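-- pv_equiv track=rewrite | github.com/funcountry/fleki | skills/knowledge/runtime/src/knowledge_graph/repository.py | _rollup_temporal_scope
-- ===== SOURCE A (Python) =====
-- from typing import Any, Dict, Iterable, List, Mapping, Optional, Sequence, Tuple
--
-- def _rollup_temporal_scope(
--
--     temporal_entries: Iterable[Mapping[str, Any]],
-- ) -> str:
--     scopes = {
--         entry.get("temporal_scope", "unknown")
--         for entry in temporal_entries
--         if isinstance(entry, Mapping)
--     }
--     scopes.discard(None)
--     if not scopes:
--         return "unknown"
--     if len(scopes) == 1:
--         return next(iter(scopes))
--     if scopes == {"unknown"}: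
--         return "unknown"
--     return "mixed"
-- ===== SOURCE B (Python) =====
-- from typing import Any, Iterable, Mapping
--
--
-- def _rollup_temporal_scope(
--     temporal_entries: "Iterable[Mapping[str, Any]]",
-- ) -> str:
--     # Single pass threading one candidate scope; exits early on the first mismatch.
--     found = None
--     for entry in temporal_entries:
--         if not isinstance(entry, Mapping):
--             continue
--         scope = entry.get("temporal_scope", "unknown")
--         if scope is None:
--             continue
--         if found is None:
--             found = scope
--         elif scope != found:
--             return "mixed"
--     return "unknown" if found is None else found
-- ===== Notes on version B (the rewrite author's own statement) =====
-- stated objective: alternative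
-- what changed: Replaced the set-comprehension-plus-cardinality classification with a single-pass scan that threads one candidate scope and returns 'mixed' immediately on the first mismatching scope.
import Mathlib
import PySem

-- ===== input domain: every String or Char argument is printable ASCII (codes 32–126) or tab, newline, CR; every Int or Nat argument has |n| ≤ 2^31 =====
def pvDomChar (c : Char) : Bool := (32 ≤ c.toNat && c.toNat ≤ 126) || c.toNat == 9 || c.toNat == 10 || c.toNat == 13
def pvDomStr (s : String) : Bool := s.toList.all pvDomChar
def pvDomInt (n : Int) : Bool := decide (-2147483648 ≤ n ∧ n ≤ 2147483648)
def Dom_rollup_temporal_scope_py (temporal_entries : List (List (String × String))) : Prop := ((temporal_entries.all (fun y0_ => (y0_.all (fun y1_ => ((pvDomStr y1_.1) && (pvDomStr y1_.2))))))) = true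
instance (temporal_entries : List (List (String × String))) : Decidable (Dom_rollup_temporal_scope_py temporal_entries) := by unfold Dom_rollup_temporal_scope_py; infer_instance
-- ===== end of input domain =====

-- B replaces A's set comprehension with a single-pass scan threading one candidate scope
-- and an early exit on the first mismatch (objective: alternative decomposition).

-- ===== PORT A =====
-- entry.get("temporal_scope", "unknown")
def pvScope (entry : List (String × String)) : String :=
  (PySem.Dict.mk entry).getD "temporal_scope" "unknown"

def rollup_temporal_scope_py (temporal_entries : List (List (String × String))) : String :=
  -- set comprehension; the 'isinstance(entry, Mapping)' filter always passes here (every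
  -- entry is a dict under the type convention), and scopes.discard(None) is a no-op
  -- (all values are Strings, never None).
  let scopes : PySem.Set String := PySem.Set.ofList (temporal_entries.map pvScope)
  if scopes = [] then "unknown"
  else if scopes.length = 1 then scopes.headD "unknown"  -- next(iter(scopes)): singleton set, order-independent
  else if PySem.Set.equal scopes (PySem.Set.ofList ["unknown"]) then "unknown"
  else "mixed"

-- ===== PORT B =====
def pvRollupGo (found : Option String) : List (List (String × String)) → String
  | [] => match found with
    | none => "unknown"
    | some s => s
  | entry :: rest =>
    -- isinstance guard of Source B always passes; 'scope is None' never holds (String values)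
    let scope := pvScope entry
    match found with
    | none => pvRollupGo (some scope) rest
    | some f => if scope ≠ f then "mixed" else pvRollupGo (some f) rest

def rollup_temporal_scope_py_alt (temporal_entries : List (List (String × String))) : String :=
  pvRollupGo none temporal_entries

-- ===== PRECONDITION & SPEC =====
def Spec_rollup_temporal_scope_py (temporal_entries : List (List (String × String))) (out : String) : Prop := out = rollup_temporal_scope_py_alt temporal_entries
instance (temporal_entries : List (List (String × String))) (out : String) : Decidable (Spec_rollup_temporal_scope_py temporal_entries out) := by unfold Spec_rollup_temporal_scope_py; infer_instance

-- ===== CLAIM (what is proved, stated in full; the proofs are below) =====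
def Claim_equal_rollup_temporal_scope_py : Prop := ∀ (temporal_entries : List (List (String × String))), Dom_rollup_temporal_scope_py temporal_entries → Spec_rollup_temporal_scope_py temporal_entries (rollup_temporal_scope_py temporal_entries)

-- ===== LEMMAS AND PROOFS =====

-- B's loop with a recorded candidate: returns the candidate iff every later scope matches it.
theorem pvRollupGo_some (c : String) (l : List (List (String × String))) :
    pvRollupGo (some c) l = if ∀ x ∈ l, pvScope x = c then c else "mixed" := by
  induction l with
  | nil => simp [pvRollupGo]
  | cons e rest ih =>
    by_cases he : pvScope e = c
    · simp only [pvRollupGo, he, ih, ne_eq, not_true_eq_false, if_false, List.mem_cons]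
      by_cases hall : ∀ x ∈ rest, pvScope x = c
      · rw [if_pos hall, if_pos]
        intro x hx
        rcases List.mem_cons.mp hx with hx | hx
        · rw [hx]; exact he
        · exact hall x hx
      · rw [if_neg hall, if_neg]
        intro h
        exact hall fun x hx => h x (List.mem_cons.mpr (Or.inr hx))
    · simp [pvRollupGo, he]

theorem ofList_all_eq (c : String) (xs : List String) (h : ∀ x ∈ xs, x = c) :
    PySem.Set.ofList (c :: xs) = [c] := by
  rw [PySem.Set.ofList_cons]
  have : PySem.Set.discard (PySem.Set.ofList xs) c = [] := by
    rw [List.eq_nil_iff_forall_not_mem]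
    intro y hy
    rw [PySem.Set.mem_discard] at hy
    exact hy.2 (h y ((PySem.Set.mem_ofList _ _).mp hy.1))
  rw [this]

-- ===== VERDICT (by name: the statement is the Claim_ definition above) =====
theorem rollup_temporal_scope_py_spec : Claim_equal_rollup_temporal_scope_py := by
  intro te _hd
  unfold Spec_rollup_temporal_scope_py rollup_temporal_scope_py rollup_temporal_scope_py_alt
  cases te with
  | nil => simp [pvRollupGo, PySem.Set.ofList]
  | cons e rest =>
    simp only [List.map_cons, pvRollupGo]
    rw [pvRollupGo_some]
    by_cases hall : ∀ x ∈ rest, pvScope x = pvScope e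
    · rw [if_pos hall]
      have h1 : PySem.Set.ofList (pvScope e :: rest.map pvScope) = [pvScope e] := by
        apply ofList_all_eq
        intro x hx
        obtain ⟨y, hy, rfl⟩ := List.mem_map.mp hx
        exact hall y hy
      simp [h1]
    · rw [if_neg hall]
      rw [not_forall] at hall
      simp only [not_forall, exists_prop] at hall
      obtain ⟨x, hx, hxne⟩ := hall
      have hce : pvScope e ∈ PySem.Set.ofList (pvScope e :: rest.map pvScope) :=
        (PySem.Set.mem_ofList _ _).mpr (List.mem_cons_self)
      have hcx : pvScope x ∈ PySem.Set.ofList (pvScope e :: rest.map pvScope) :=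
        (PySem.Set.mem_ofList _ _).mpr (List.mem_cons_of_mem _ (List.mem_map_of_mem hx))
      have hne : PySem.Set.ofList (pvScope e :: rest.map pvScope) ≠ [] := by
        intro h; rw [h] at hce; exact (List.not_mem_nil) hce
      have hlen : (PySem.Set.ofList (pvScope e :: rest.map pvScope)).length ≠ 1 := by
        intro h
        obtain ⟨y, hy⟩ := List.length_eq_one_iff.mp h
        rw [hy] at hce hcx
        simp at hce hcx
        exact hxne (hcx.trans hce.symm)
      have heq : PySem.Set.equal (PySem.Set.ofList (pvScope e :: rest.map pvScope)) (PySem.Set.ofList ["unknown"]) = false := by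
        rw [Bool.eq_false_iff]
        intro h
        have h2 := (PySem.Set.equal_iff _ _).mp h
        have hc1 := (h2 (pvScope e)).mp hce
        have hc2 := (h2 (pvScope x)).mp hcx
        simp [PySem.Set.ofList] at hc1 hc2
        exact hxne (hc2.trans hc1.symm)
      simp [hne, hlen, heq]
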